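-- pv_equiv track=rewrite | github.com/alexyvassili/code-challenges | leetcode/leetcode_0037.py | get_ixes
-- ===== SOURCE A (Python) =====
-- def get_ixes(i):
--     ixes = {i}
--     left_side = i % 3
--     right_side = 2 - left_side
--     for k in range(1, left_side + 1):
--         ixes.add(i - k)
--     for k in range(1, right_side + 1):
--         ixes.add(i + k)
--     return ixes
-- ===== SOURCE B (Python) =====
-- def get_ixes(i):
--     block = i // 3
--     ixes = {i}
--     for j in (i - 1, i + 1, i - 2, i + 2):
--         if j // 3 == block:
--             ixes.add(j)
--     return ixes
-- ===== Notes on version B (the rewrite author's own statement) =====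
-- stated objective: alternative
-- what changed: Instead of deriving left/right loop extents from i % 3 and accumulating two range() loops, B computes the block id i // 3 once and filters the four candidate neighbours i-1, i+1, i-2, i+2 by the same-block predicate j // 3 == i // 3.
import Mathlib
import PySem

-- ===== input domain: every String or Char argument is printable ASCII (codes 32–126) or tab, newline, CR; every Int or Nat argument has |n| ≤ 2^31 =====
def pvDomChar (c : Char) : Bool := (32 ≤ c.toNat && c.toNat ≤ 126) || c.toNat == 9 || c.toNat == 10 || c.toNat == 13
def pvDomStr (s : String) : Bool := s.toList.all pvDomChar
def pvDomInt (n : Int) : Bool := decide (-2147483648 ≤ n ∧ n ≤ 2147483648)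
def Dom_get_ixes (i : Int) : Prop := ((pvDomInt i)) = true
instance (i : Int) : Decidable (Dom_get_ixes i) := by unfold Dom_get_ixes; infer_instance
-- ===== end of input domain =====

-- B replaces A's mod-derived loop extents with a same-block filter over the four neighbours i±1, i±2
-- using floor division (alternative decomposition); return-value equivalence.
-- ===== PORT A =====
def get_ixes (i : Int) : List Int :=
  let ixes : PySem.Set Int := PySem.Set.ofList [i]
  let left_side : Int := PySem.Int.mod i 3
  let right_side : Int := 2 - left_side
  let ixes := (PySem.List.pyRange 1 (left_side + 1) 1).foldl
    (fun s k => PySem.Set.add s (i - k)) ixes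
  let ixes := (PySem.List.pyRange 1 (right_side + 1) 1).foldl
    (fun s k => PySem.Set.add s (i + k)) ixes
  ixes

-- ===== PORT B =====
def get_ixes_alt (i : Int) : List Int :=
  let block : Int := PySem.Int.floordiv i 3
  let ixes : PySem.Set Int := PySem.Set.ofList [i]
  ([i - 1, i + 1, i - 2, i + 2]).foldl
    (fun s j => if PySem.Int.floordiv j 3 = block then PySem.Set.add s j else s) ixes

-- ===== PRECONDITION & SPEC =====
def Spec_get_ixes (i : Int) (out : List Int) : Prop := out = get_ixes_alt i
instance (i : Int) (out : List Int) : Decidable (Spec_get_ixes i out) := by unfold Spec_get_ixes; infer_instance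

-- ===== CLAIM (what is proved, stated in full; the proofs are below) =====
def Claim_equal_get_ixes : Prop := ∀ (i : Int), Dom_get_ixes i → Spec_get_ixes i (get_ixes i)

-- ===== LEMMAS AND PROOFS =====
theorem pv_mod_emod (i : Int) : PySem.Int.mod i 3 = i % 3 :=
  PySem.Int.mod_eq_emod_of_pos (by norm_num)

theorem pv_fdiv_ediv (a : Int) : PySem.Int.floordiv a 3 = a / 3 :=
  PySem.Int.floordiv_eq_ediv_of_pos (by norm_num)

-- ===== VERDICT (by name: the statement is the Claim_ definition above) =====
theorem get_ixes_spec : Claim_equal_get_ixes := by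
  intro i _
  show get_ixes i = get_ixes_alt i
  have h3 : i % 3 = 0 ∨ i % 3 = 1 ∨ i % 3 = 2 := by omega
  rcases h3 with h | h | h
  all_goals
    simp only [get_ixes, get_ixes_alt, pv_mod_emod, pv_fdiv_ediv, h, List.foldl_cons,
      List.foldl_nil]
  · have e1 : ¬((i - 1) / 3 = i / 3) := by omega
    have e2 : (i + 1) / 3 = i / 3 := by omega
    have e3 : ¬((i - 2) / 3 = i / 3) := by omega
    have e4 : (i + 2) / 3 = i / 3 := by omega
    rw [show (0:Int) + 1 = 1 from by norm_num, show (2:Int) - 0 + 1 = 3 from by norm_num,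
      show PySem.List.pyRange 1 1 1 = [] from by decide,
      show PySem.List.pyRange 1 3 1 = [1, 2] from by decide,
      if_neg e1, if_pos e2, if_neg e3, if_pos e4]
    simp only [List.foldl_cons, List.foldl_nil]
  · have e1 : (i - 1) / 3 = i / 3 := by omega
    have e2 : (i + 1) / 3 = i / 3 := by omega
    have e3 : ¬((i - 2) / 3 = i / 3) := by omega
    have e4 : ¬((i + 2) / 3 = i / 3) := by omega
    rw [show (1:Int) + 1 = 2 from by norm_num, show (2:Int) - 1 + 1 = 2 from by norm_num,
      show PySem.List.pyRange 1 2 1 = [1] from by decide,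
      if_pos e1, if_pos e2, if_neg e3, if_neg e4]
    simp only [List.foldl_cons, List.foldl_nil]
  · have e1 : (i - 1) / 3 = i / 3 := by omega
    have e2 : ¬((i + 1) / 3 = i / 3) := by omega
    have e3 : (i - 2) / 3 = i / 3 := by omega
    have e4 : ¬((i + 2) / 3 = i / 3) := by omega
    rw [show (2:Int) + 1 = 3 from by norm_num, show (2:Int) - 2 + 1 = 1 from by norm_num,
      show PySem.List.pyRange 1 3 1 = [1, 2] from by decide,
      show PySem.List.pyRange 1 1 1 = [] from by decide,
      if_pos e1, if_neg e2, if_pos e3, if_neg e4]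
    simp only [List.foldl_cons, List.foldl_nil]
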